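-- pv_equiv track=rewrite | github.com/drawmoon/cn2date | cn2date/nl/selector.py | parse
-- ===== SOURCE A (Python) =====
-- def parse(text: str) -> list[str]:
--     """
--
--     :param text:
--     :return:
--     """
--     last_end = 0
--     operator = -1
--
--     items: list[str] = []
--     for i, s in enumerate(text):
--         if s == ":":
--             if operator == -1:
--                 if last_end != i:
--                     items.append(text[last_end:i])
--
--                 operator = i
--             else:
--                 items.append(text[operator : i + 1])
--                 operator = -1
--
--             last_end = i + 1
--     else:
--         items.append(text[last_end : len(text)])
--
--     return items
-- ===== SOURCE B (Python) =====
-- def parse(text: str) -> list[str]: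
--     # Collect colon positions first, then pair them up; plain segments between
--     # operator tokens are appended only when non-empty, the trailing one always.
--     cols = [i for i, ch in enumerate(text) if ch == ":"]
--     items: list[str] = []
--     last_end = 0
--     while len(cols) >= 2:
--         o, c = cols[0], cols[1]
--         if last_end != o:
--             items.append(text[last_end:o])
--         items.append(text[o:c + 1])
--         last_end = c + 1
--         cols = cols[2:]
--     if cols:
--         o = cols[0]
--         if last_end != o:
--             items.append(text[last_end:o])
--         last_end = o + 1
--     items.append(text[last_end:])
--     return items
-- ===== Notes on version B (the rewrite author's own statement) =====
-- stated objective: alternative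
-- what changed: B replaces A's char-by-char state machine (last_end/operator flags over enumerate(text)) with a two-phase decomposition: collect all colon positions first, then consume that position list two at a time, pairing each opening colon with its closing one.
import Mathlib
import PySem

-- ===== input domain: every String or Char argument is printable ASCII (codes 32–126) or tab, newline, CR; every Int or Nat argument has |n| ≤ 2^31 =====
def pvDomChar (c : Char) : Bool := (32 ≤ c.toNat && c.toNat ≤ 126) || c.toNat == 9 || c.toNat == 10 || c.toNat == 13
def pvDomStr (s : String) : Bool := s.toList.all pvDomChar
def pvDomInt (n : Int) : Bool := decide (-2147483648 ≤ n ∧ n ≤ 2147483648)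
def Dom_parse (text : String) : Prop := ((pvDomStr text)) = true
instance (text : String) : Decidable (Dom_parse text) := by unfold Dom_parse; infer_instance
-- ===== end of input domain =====

-- B rewrites A's char-by-char state machine as: collect all colon positions first, then
-- consume them two at a time (alternative decomposition, same cost).

-- ===== PORT A =====
-- A's loop body: state (last_end, operator, items); operator = -1 means "no open colon".
def stepA (text : String) (st : Int × Int × List String) (p : Int × Char) : Int × Int × List String :=
  if p.2 = ':' then
    if st.2.1 = -1 then
      (p.1 + 1, p.1,
        if st.1 ≠ p.1 then st.2.2 ++ [PySem.Str.slice text (some st.1) (some p.1)] else st.2.2)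
    else
      (p.1 + 1, -1, st.2.2 ++ [PySem.Str.slice text (some st.2.1) (some (p.1 + 1))])
  else st

-- after the loop: the unconditional trailing append (Python's for/else)
def finishA (text : String) (st : Int × Int × List String) : List String :=
  st.2.2 ++ [PySem.Str.slice text (some st.1) (some (PySem.Str.len text))]

def parse (text : String) : List String :=
  finishA text ((PySem.List.enumerate text.toList 0).foldl (stepA text) (0, -1, ([] : List String)))

-- ===== PORT B =====
-- B's while-loop over the colon-position list, two positions at a time; the final
-- `if cols:` and trailing append are the two base cases.
def pairLoop (text : String) : List Int → Int → List String → List String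
  | o :: c :: rest, last_end, items =>
      pairLoop text rest (c + 1)
        ((if last_end ≠ o then items ++ [PySem.Str.slice text (some last_end) (some o)] else items)
          ++ [PySem.Str.slice text (some o) (some (c + 1))])
  | [o], last_end, items =>
      (if last_end ≠ o then items ++ [PySem.Str.slice text (some last_end) (some o)] else items)
        ++ [PySem.Str.slice text (some (o + 1)) (some (PySem.Str.len text))]
  | [], last_end, items =>
      items ++ [PySem.Str.slice text (some last_end) (some (PySem.Str.len text))]

def parse_alt (text : String) : List String :=
  let cols := (PySem.List.enumerate text.toList 0).filterMap
    (fun p => if p.2 = ':' then some p.1 else none)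
  pairLoop text cols 0 []

-- ===== PRECONDITION & SPEC =====
def Spec_parse (text : String) (out : List String) : Prop := out = parse_alt text
instance (text : String) (out : List String) : Decidable (Spec_parse text out) := by unfold Spec_parse; infer_instance

-- ===== CLAIM (what is proved, stated in full; the proofs are below) =====
def Claim_equal_parse : Prop := ∀ (text : String), Dom_parse text → Spec_parse text (parse text)

-- ===== LEMMAS AND PROOFS =====

-- continuation of B's pairing loop when a colon at o is already open
def openCont (text : String) (o : Int) : List Int → List String → List String
  | [], items => items ++ [PySem.Str.slice text (some (o + 1)) (some (PySem.Str.len text))]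
  | c :: rest, items =>
      pairLoop text rest (c + 1) (items ++ [PySem.Str.slice text (some o) (some (c + 1))])

def colsOf (cs : List Char) (i : Int) : List Int :=
  (PySem.List.enumerate cs i).filterMap (fun p => if p.2 = ':' then some p.1 else none)

theorem pairLoop_cons (text : String) (o : Int) (rest : List Int) (last_end : Int)
    (items : List String) :
    pairLoop text (o :: rest) last_end items =
      openCont text o rest
        (if last_end ≠ o then items ++ [PySem.Str.slice text (some last_end) (some o)] else items) := by
  cases rest <;> rfl

theorem colsOf_cons (c : Char) (cs : List Char) (i : Int) :
    colsOf (c :: cs) i = (if c = ':' then [i] else []) ++ colsOf cs (i + 1) := by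
  simp only [colsOf, PySem.List.enumerate_cons, List.filterMap_cons]
  split <;> simp_all

-- main invariant: A's fold-and-finish equals B's pairing loop, in both operator states
theorem foldA_eq (text : String) (cs : List Char) :
    (∀ (i last_end : Int) (items : List String), 0 ≤ i →
        finishA text ((PySem.List.enumerate cs i).foldl (stepA text) (last_end, -1, items)) =
          pairLoop text (colsOf cs i) last_end items) ∧
    (∀ (i o : Int) (items : List String), 0 ≤ i → o ≠ -1 →
        finishA text ((PySem.List.enumerate cs i).foldl (stepA text) (o + 1, o, items)) =
          openCont text o (colsOf cs i) items) := by
  induction cs with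
  | nil => exact ⟨fun i le items _ => rfl, fun i o items _ _ => rfl⟩
  | cons ch cs ih =>
    constructor
    · intro i last_end items hi
      rw [PySem.List.enumerate_cons, List.foldl_cons, colsOf_cons]
      by_cases hc : ch = ':'
      · subst hc
        simp only [if_pos, List.singleton_append]
        rw [pairLoop_cons]
        by_cases hle : last_end = i
        · have hs : stepA text (last_end, -1, items) (i, ':') = (i + 1, i, items) := by
            simp [stepA, hle]
          rw [hs, if_neg (by simp [hle])]
          exact ih.2 (i + 1) i items (by omega) (by omega)
        · have hs : stepA text (last_end, -1, items) (i, ':') =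
              (i + 1, i, items ++ [PySem.Str.slice text (some last_end) (some i)]) := by
            simp [stepA, hle]
          rw [hs, if_pos hle]
          exact ih.2 (i + 1) i _ (by omega) (by omega)
      · have hs : stepA text (last_end, -1, items) (i, ch) = (last_end, -1, items) := by
          simp [stepA, hc]
        rw [hs, if_neg hc, List.nil_append]
        exact ih.1 (i + 1) last_end items (by omega)
    · intro i o items hi ho
      rw [PySem.List.enumerate_cons, List.foldl_cons, colsOf_cons]
      by_cases hc : ch = ':'
      · subst hc
        have hs : stepA text (o + 1, o, items) (i, ':') =
            (i + 1, -1, items ++ [PySem.Str.slice text (some o) (some (i + 1))]) := by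
          simp [stepA, ho]
        rw [hs, if_pos rfl, List.singleton_append]
        show _ = openCont text o (i :: colsOf cs (i + 1)) items
        rw [openCont]
        exact ih.1 (i + 1) (i + 1) _ (by omega)
      · have hs : stepA text (o + 1, o, items) (i, ch) = (o + 1, o, items) := by
          simp [stepA, hc]
        rw [hs, if_neg hc, List.nil_append]
        exact ih.2 (i + 1) o items (by omega) ho

-- ===== VERDICT (by name: the statement is the Claim_ definition above) =====
theorem parse_spec : Claim_equal_parse := by
  intro text _
  unfold Spec_parse parse parse_alt
  exact (foldA_eq text text.toList).1 0 0 [] le_rfl
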